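-- pv_equiv track=rewrite | github.com/lisa-belle-suzuki/algorithm_study | atcoder/ABC192C.py | g2
-- ===== SOURCE A (Python) =====
-- def g2(x: int) -> int:
--     nums = []
--     while x > 0:
--         nums.append(x % 10)
--         x //= 10
--     nums.sort()
--     ret = 0
--     for num in nums:
--         if num == 0:
--             continue
--         ret += num
--         ret *= 10
--     return ret//10
-- ===== SOURCE B (Python) =====
-- def g2(x: int) -> int:
--     count = {}
--     while x > 0:
--         d = x % 10
--         count[d] = count.get(d, 0) + 1
--         x //= 10
--     ret = 0
--     for d in range(1, 10):
--         for _ in range(count.get(d, 0)):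
--             ret = ret * 10 + d
--     return ret
-- ===== Notes on version B (the rewrite author's own statement) =====
-- stated objective: alternative
-- what changed: Replaces the digit-list + comparison sort + skip-zero shifted rebuild with a counting pass into a digit-frequency dict and a direct ascending reconstruction over the nonzero digit values (no list, no sort, no trailing floor-division trick).
import Mathlib
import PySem

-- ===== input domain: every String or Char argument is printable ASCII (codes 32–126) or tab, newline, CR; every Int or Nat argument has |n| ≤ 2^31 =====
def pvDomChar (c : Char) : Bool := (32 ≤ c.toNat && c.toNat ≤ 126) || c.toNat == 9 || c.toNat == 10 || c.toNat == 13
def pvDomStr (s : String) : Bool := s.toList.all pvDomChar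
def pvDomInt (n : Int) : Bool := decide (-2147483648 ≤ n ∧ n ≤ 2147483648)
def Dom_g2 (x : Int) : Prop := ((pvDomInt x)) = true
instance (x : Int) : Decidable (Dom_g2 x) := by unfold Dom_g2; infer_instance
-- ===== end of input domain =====

-- B counts digit frequencies in a dict and rebuilds the answer ascending with ret*10+d; same value as A's sort-based version (alternative decomposition, not claimed faster).

-- termination helper for the while-loops (x //= 10 strictly shrinks a positive x)
theorem pv_div10_lt (x : Int) (h : 0 < x) : (PySem.Int.floordiv x 10).toNat < x.toNat := by
  rw [PySem.Int.floordiv_eq_ediv_of_pos (by norm_num : (0:Int) < 10)]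
  omega

-- ===== PORT A =====
def g2_loop (x : Int) (nums : List Int) : List Int :=
  if h : 0 < x then g2_loop (PySem.Int.floordiv x 10) (nums ++ [PySem.Int.mod x 10]) else nums
termination_by x.toNat
decreasing_by exact pv_div10_lt x h

def g2 (x : Int) : Int :=
  let nums := PySem.List.sorted (g2_loop x []) (fun n => n) false
  let ret := nums.foldl (fun ret num => if num = 0 then ret else (ret + num) * 10) 0
  PySem.Int.floordiv ret 10

-- ===== PORT B =====
def g2_alt_loop (x : Int) (count : PySem.Dict Int Int) : PySem.Dict Int Int :=
  if h : 0 < x then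
    g2_alt_loop (PySem.Int.floordiv x 10)
      (count.insert (PySem.Int.mod x 10) (count.getD (PySem.Int.mod x 10) 0 + 1))
  else count
termination_by x.toNat
decreasing_by exact pv_div10_lt x h

def g2_alt (x : Int) : Int :=
  let count := g2_alt_loop x PySem.Dict.empty
  (PySem.List.pyRange 1 10 1).foldl
    (fun ret d => (PySem.List.pyRange 0 (count.getD d 0) 1).foldl (fun ret _ => ret * 10 + d) ret) 0

-- ===== PRECONDITION & SPEC =====
def Spec_g2 (x : Int) (out : Int) : Prop := out = g2_alt x
instance (x : Int) (out : Int) : Decidable (Spec_g2 x out) := by unfold Spec_g2; infer_instance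

-- ===== CLAIM (what is proved, stated in full; the proofs are below) =====
def Claim_equal_g2 : Prop := ∀ (x : Int), Dom_g2 x → Spec_g2 x (g2 x)

-- ===== LEMMAS AND PROOFS =====

-- the little-endian digit list of x (empty for x ≤ 0)
def pvDigits (x : Int) : List Int :=
  if h : 0 < x then PySem.Int.mod x 10 :: pvDigits (PySem.Int.floordiv x 10) else []
termination_by x.toNat
decreasing_by exact pv_div10_lt x h

theorem g2_loop_eq (x : Int) (nums : List Int) : g2_loop x nums = nums ++ pvDigits x := by
  by_cases h : 0 < x
  · rw [g2_loop, pvDigits, dif_pos h, dif_pos h,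
      g2_loop_eq (PySem.Int.floordiv x 10) (nums ++ [PySem.Int.mod x 10])]
    simp
  · rw [g2_loop, pvDigits, dif_neg h, dif_neg h, List.append_nil]
termination_by x.toNat
decreasing_by exact pv_div10_lt x h

theorem g2_alt_loop_getD (x : Int) (cnt : PySem.Dict Int Int) (v : Int) :
    (g2_alt_loop x cnt).getD v 0 = cnt.getD v 0 + ((pvDigits x).count v : Int) := by
  by_cases h : 0 < x
  · rw [g2_alt_loop, pvDigits, dif_pos h, dif_pos h,
      g2_alt_loop_getD (PySem.Int.floordiv x 10) _ v, PySem.Dict.getD_insert,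
      List.count_cons]
    by_cases hv : v = PySem.Int.mod x 10
    · subst hv
      simp only [beq_self_eq_true, if_true]
      push_cast
      ring
    · have hb : (PySem.Int.mod x 10 == v) = false :=
        beq_eq_false_iff_ne.mpr (fun e => hv e.symm)
      rw [if_neg hv, hb]
      simp
  · rw [g2_alt_loop, pvDigits, dif_neg h, dif_neg h]; simp
termination_by x.toNat
decreasing_by exact pv_div10_lt x h

theorem pvDigits_bounds (x : Int) : ∀ n ∈ pvDigits x, 0 ≤ n ∧ n < 10 := by
  by_cases h : 0 < x
  · rw [pvDigits, dif_pos h]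
    intro n hn
    rcases List.mem_cons.mp hn with rfl | hn
    · exact ⟨PySem.Int.mod_nonneg _ (by norm_num), PySem.Int.mod_lt _ (by norm_num)⟩
    · exact pvDigits_bounds (PySem.Int.floordiv x 10) n hn
  · rw [pvDigits, dif_neg h]; simp
termination_by x.toNat
decreasing_by exact pv_div10_lt x h

-- the canonical sorted form of a digit list: its digits bucketed by value
def pvCanon (l : List Int) : List Int :=
  ([0,1,2,3,4,5,6,7,8,9] : List Int).flatMap (fun d => List.replicate (l.count d) d)

theorem pvCanon_perm (l : List Int) (hb : ∀ n ∈ l, 0 ≤ n ∧ n < 10) : (pvCanon l).Perm l := by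
  rw [List.perm_iff_count]
  intro a
  by_cases ha : 0 ≤ a ∧ a < 10
  · obtain ⟨h1, h2⟩ := ha
    interval_cases a <;>
      simp [pvCanon, List.count_append, List.count_replicate]
  · have hnm : a ∉ l := fun hm => ha ⟨(hb a hm).1, (hb a hm).2⟩
    rw [List.count_eq_zero_of_not_mem hnm]
    simp only [pvCanon, List.flatMap_cons, List.flatMap_nil, List.count_append,
      List.count_replicate, List.count_nil, beq_iff_eq]
    have : ∀ b : Int, b ≠ a → (if b = a then l.count b else 0) = 0 := fun b hb => if_neg hb
    rw [this 0 (by omega), this 1 (by omega), this 2 (by omega), this 3 (by omega),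
      this 4 (by omega), this 5 (by omega), this 6 (by omega), this 7 (by omega),
      this 8 (by omega), this 9 (by omega)]

theorem pv_flatMap_rep_pairwise (c : Int → Nat) :
    ∀ ds : List Int, ds.Pairwise (· ≤ ·) →
      (ds.flatMap (fun d => List.replicate (c d) d)).Pairwise (· ≤ ·) := by
  intro ds hds
  induction ds with
  | nil => simp
  | cons d ds ih =>
    rw [List.flatMap_cons]
    refine List.pairwise_append.mpr ⟨?_, ih hds.tail, ?_⟩
    · exact List.pairwise_replicate.mpr (Or.inr le_rfl)
    · intro a ha b hb
      obtain rfl := (List.eq_of_mem_replicate ha)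
      obtain ⟨d', hd', hbd'⟩ := List.mem_flatMap.mp hb
      obtain rfl := List.eq_of_mem_replicate hbd'
      exact List.rel_of_pairwise_cons hds hd'

theorem sorted_eq_canon (x : Int) :
    PySem.List.sorted (pvDigits x) (fun n => n) false = pvCanon (pvDigits x) := by
  apply PySem.List.sorted_id_eq_of_perm_of_pairwise
  · exact pvCanon_perm _ (pvDigits_bounds x)
  · exact pv_flatMap_rep_pairwise _ _ (by decide)

-- A's fold ignores a block of zeros
theorem foldA_rep_zero (n : Nat) (r : Int) :
    (List.replicate n (0:Int)).foldl (fun ret num => if num = 0 then ret else (ret + num) * 10) r = r := by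
  induction n with
  | zero => rfl
  | succ n ih => simp [List.replicate_succ, ih]

-- over a block of a single nonzero digit, A's fold is 10 × B's fold
theorem foldA_rep (d : Int) (hd : d ≠ 0) (n : Nat) : ∀ b : Int,
    (List.replicate n d).foldl (fun ret num => if num = 0 then ret else (ret + num) * 10) (10 * b)
      = 10 * (List.replicate n d).foldl (fun r x => r * 10 + x) b := by
  induction n with
  | zero => intro b; rfl
  | succ n ih =>
    intro b
    rw [List.replicate_succ, List.foldl_cons, List.foldl_cons, if_neg hd]
    have : (10 * b + d) * 10 = 10 * (b * 10 + d) := by ring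
    rw [this, ih (b * 10 + d)]

theorem foldA_flatMap (c : Int → Nat) :
    ∀ ds : List Int, (∀ d ∈ ds, d ≠ 0) → ∀ b : Int,
      (ds.flatMap (fun d => List.replicate (c d) d)).foldl
          (fun ret num => if num = 0 then ret else (ret + num) * 10) (10 * b)
        = 10 * (ds.flatMap (fun d => List.replicate (c d) d)).foldl (fun r x => r * 10 + x) b := by
  intro ds
  induction ds with
  | nil => intro _ b; rfl
  | cons d ds ih =>
    intro hnz b
    rw [List.flatMap_cons, List.foldl_append, List.foldl_append,
      foldA_rep d (hnz d (by simp)) (c d) b]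
    exact ih (fun d' hd' => hnz d' (by simp [hd'])) _

-- a fold that ignores its list argument is an iterate of its step
theorem foldl_ignore {α : Type} (s : Int → Int) :
    ∀ (l : List α) (r : Int), l.foldl (fun r _ => s r) r = s^[l.length] r := by
  intro l
  induction l with
  | nil => intro r; rfl
  | cons a l ih =>
    intro r
    rw [List.foldl_cons, ih (s r), List.length_cons, Function.iterate_succ_apply]

theorem foldl_rep_g (d : Int) (n : Nat) : ∀ r : Int,
    (List.replicate n d).foldl (fun r x => r * 10 + x) r = (fun r => r * 10 + d)^[n] r := by
  induction n with
  | zero => intro r; rfl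
  | succ n ih =>
    intro r
    rw [List.replicate_succ, List.foldl_cons, ih, Function.iterate_succ_apply]

-- B's inner for-loop over range(c) equals the fold over the replicate block
theorem inner_eq (d : Int) (n : Nat) (r : Int) :
    (PySem.List.pyRange 0 (n : Int) 1).foldl (fun ret _ => ret * 10 + d) r
      = (List.replicate n d).foldl (fun r x => r * 10 + x) r := by
  rw [foldl_ignore (fun r => r * 10 + d) _ r, foldl_rep_g d n r,
    PySem.List.length_pyRange_one]
  simp

-- ===== VERDICT (by name: the statement is the Claim_ definition above) =====
theorem g2_spec : Claim_equal_g2 := by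
  intro x _
  unfold Spec_g2
  show PySem.Int.floordiv _ 10 = _
  have hcnt : ∀ d : Int, (g2_alt_loop x PySem.Dict.empty).getD d 0 = ((pvDigits x).count d : Int) := by
    intro d; rw [g2_alt_loop_getD, PySem.Dict.getD_empty]; ring
  have hR : PySem.List.pyRange 1 10 1 = ([1,2,3,4,5,6,7,8,9] : List Int) := by decide
  -- rewrite B into a fold over the nonzero buckets
  have hB : g2_alt x
      = (([1,2,3,4,5,6,7,8,9] : List Int).flatMap
          (fun d => List.replicate ((pvDigits x).count d) d)).foldl (fun r x => r * 10 + x) 0 := by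
    unfold g2_alt
    rw [hR]
    simp only [hcnt, List.flatMap_cons, List.flatMap_nil, List.foldl_cons, List.foldl_nil,
      List.foldl_append, List.append_nil, inner_eq]
  -- rewrite A into 10 × that fold, then divide
  rw [g2_loop_eq x [], List.nil_append, sorted_eq_canon x]
  have hz : ∀ d ∈ ([1,2,3,4,5,6,7,8,9] : List Int), d ≠ 0 := by decide
  have hcanon : pvCanon (pvDigits x)
      = List.replicate ((pvDigits x).count 0) 0
        ++ ([1,2,3,4,5,6,7,8,9] : List Int).flatMap
             (fun d => List.replicate ((pvDigits x).count d) d) := by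
    simp [pvCanon, List.flatMap_cons]
  rw [hcanon, List.foldl_append, foldA_rep_zero]
  have hA := foldA_flatMap (fun d => (pvDigits x).count d) [1,2,3,4,5,6,7,8,9] hz 0
  rw [show (10:Int) * 0 = 0 from by norm_num] at hA
  rw [hA, ← hB,
    PySem.Int.floordiv_eq_ediv_of_pos (by norm_num : (0:Int) < 10),
    Int.mul_ediv_cancel_left _ (by norm_num)]
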